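-- pv_equiv track=rewrite | github.com/ramnath-1998/Jinta-Project | jinta_project.py | multiply_multiplier_with_multiplicand
-- ===== SOURCE A (Python) =====
-- def convert_to_binary_array(number):
--     binary_number = bin(number)[2:]
--     array = []
--     for each_digit in binary_number:
--         array.append(int(each_digit))
--     return array
--
-- def calculate_length_of_product(multiplier_array,multiplicand_array,shift):
--     for i in range(0,len(multiplier_array)):
--         if i == 0 :
--             result = len(multiplicand_array)
--         else :
--             result = result + shift
--     result = result + shift
--     return result
--
-- def add_zeros_to_start_of_array(products_array, length_of_product):
--     for each_product in products_array:
--        while len(each_product) < length_of_product: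
--            each_product.insert(0,0)
--     return products_array
--
-- def add_none_to_end_of_array(products_array, shift):
--     for i in range(0,len(products_array)):
--         for _ in range(i*shift):
--             products_array[i].append(None)
--     return products_array
--
-- def multiply_multiplier_digit_with_multiplicand(multiplier_binary_digit, multiplicand_array):
--     result_array = []
--     for each_digit in multiplicand_array:
--         result_array.append(each_digit&multiplier_binary_digit)
--     return result_array
--
-- def multiply_multiplier_with_multiplicand(multiplier, multiplicand):
--     multiplicand_array = convert_to_binary_array(multiplicand)
--     multiplier_array = convert_to_binary_array(multiplier)
--     shift = 2
--     length_of_product = calculate_length_of_product(multiplier_array, multiplicand_array, shift)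
--     result_array = []
--     for i in range(0,len(multiplier_array)):
--         result = multiply_multiplier_digit_with_multiplicand(multiplier_array[i],multiplicand_array)
--         result_array.append(result)
--     add_none_to_end_of_array(result_array, shift)
--     add_zeros_to_start_of_array(result_array, length_of_product)
--     return result_array
-- ===== SOURCE B (Python) =====
-- def multiply_multiplier_with_multiplicand(multiplier, multiplicand):
--     multiplicand_array = [int(c) for c in bin(multiplicand)[2:]]
--     multiplier_array = [int(c) for c in bin(multiplier)[2:]]
--     shift = 2
--     M = len(multiplier_array)
--     rows = []
--     for i, bit in enumerate(multiplier_array):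
--         product = [d & bit for d in multiplicand_array]
--         rows.append([0] * (shift * (M - i)) + product + [None] * (i * shift))
--     return rows
-- ===== Notes on version B (the rewrite author's own statement) =====
-- stated objective: simpler
-- what changed: B replaces A's three-stage pipeline (build partial products, then a pass appending None tails, then a repeated insert(0,0) zero-padding pass driven by a separately computed target length) with a single enumerate loop that assembles each padded row in one expression, computing the zero/None pad counts arithmetically.
import Mathlib
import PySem

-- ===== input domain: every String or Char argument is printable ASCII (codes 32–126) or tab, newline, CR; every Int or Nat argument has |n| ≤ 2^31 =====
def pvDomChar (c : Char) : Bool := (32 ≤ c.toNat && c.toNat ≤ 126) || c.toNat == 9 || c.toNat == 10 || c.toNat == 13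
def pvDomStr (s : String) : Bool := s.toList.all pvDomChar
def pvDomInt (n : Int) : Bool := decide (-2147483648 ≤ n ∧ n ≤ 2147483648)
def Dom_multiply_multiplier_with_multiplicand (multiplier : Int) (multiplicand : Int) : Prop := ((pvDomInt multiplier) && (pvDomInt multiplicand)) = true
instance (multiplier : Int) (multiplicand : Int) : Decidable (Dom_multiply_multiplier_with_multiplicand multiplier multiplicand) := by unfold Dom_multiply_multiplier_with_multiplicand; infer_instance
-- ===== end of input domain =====

-- B assembles each padded row in one expression with arithmetic pad counts, replacing A's
-- three separate padding passes; equivalence of RETURN values is proved for nonnegative inputs.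

-- ===== PORT A =====

-- bin(n)[2:] digit list for n ≥ 0 (exact on Pre_: Python's bin of a nonnegative int, MSB first; bin(0)[2:] = "0")
def pvBinAux : Nat → List Int
  | 0 => []
  | n+1 => pvBinAux ((n+1) / 2) ++ [(((n+1) % 2 : Nat) : Int)]
decreasing_by exact Nat.div_lt_self (Nat.succ_pos n) (by omega)

-- convert_to_binary_array(number) for number ≥ 0
def convert_to_binary_array (number : Int) : List Int :=
  if number.toNat = 0 then [0] else pvBinAux number.toNat

-- Python '&' on the nonnegative 0/1 digits that occur here (exact for nonnegative operands)
def pvAnd (a b : Int) : Int := ((a.toNat &&& b.toNat : Nat) : Int)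

-- calculate_length_of_product: the loop leaves result = len(multiplicand_array) + shift*(len(multiplier_array)-1);
-- init 0 stands for Python's unbound 'result', never read since multiplier_array is nonempty on Pre_
def calculate_length_of_product (multiplier_array multiplicand_array : List Int) (shift : Nat) : Nat :=
  ((List.range multiplier_array.length).foldl
    (fun result i => if i = 0 then multiplicand_array.length else result + shift) 0) + shift

def multiply_multiplier_digit_with_multiplicand (bit : Int) (multiplicand_array : List Int) : List (Option Int) :=
  multiplicand_array.foldl (fun acc d => acc ++ [some (pvAnd d bit)]) []

-- add_none_to_end_of_array: row i gets i*shift Nones appended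
def add_none_to_end_of_array : Nat → Nat → List (List (Option Int)) → List (List (Option Int))
  | _, _, [] => []
  | i, shift, r :: rs => (r ++ List.replicate (i * shift) none) :: add_none_to_end_of_array (i+1) shift rs

-- add_zeros_to_start_of_array's while-loop: insert 0 at the front until length reaches L
def add_zeros_to_start (L : Nat) (r : List (Option Int)) : List (Option Int) :=
  List.replicate (L - r.length) (some 0) ++ r

def multiply_multiplier_with_multiplicand (multiplier : Int) (multiplicand : Int) : List (List (Option Int)) :=
  let multiplicand_array := convert_to_binary_array multiplicand
  let multiplier_array := convert_to_binary_array multiplier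
  let shift := 2
  let length_of_product := calculate_length_of_product multiplier_array multiplicand_array shift
  let result_array := (List.range multiplier_array.length).foldl
    (fun acc i => acc ++ [multiply_multiplier_digit_with_multiplicand (multiplier_array.getD i 0) multiplicand_array]) []
  (add_none_to_end_of_array 0 shift result_array).map (add_zeros_to_start length_of_product)

-- ===== PORT B =====

-- rows of Source B's enumerate loop: row i = [0]*(2*(M-i)) + product + [None]*(i*2)
def altRows (mc : List Int) (M : Nat) : Nat → List Int → List (List (Option Int))
  | _, [] => []
  | i, bit :: rest =>
      (List.replicate (2 * (M - i)) (some 0)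
        ++ mc.map (fun d => some (pvAnd d bit))
        ++ List.replicate (i * 2) none) :: altRows mc M (i+1) rest

def multiply_multiplier_with_multiplicand_alt (multiplier : Int) (multiplicand : Int) : List (List (Option Int)) :=
  let multiplicand_array := convert_to_binary_array multiplicand
  let multiplier_array := convert_to_binary_array multiplier
  altRows multiplicand_array multiplier_array.length 0 multiplier_array

-- ===== PRECONDITION & SPEC =====
-- A raises ValueError on any negative argument (bin() emits a '-' that int() rejects); Pre_ excludes exactly those.
def Pre_multiply_multiplier_with_multiplicand (multiplier : Int) (multiplicand : Int) : Prop :=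
  0 ≤ multiplier ∧ 0 ≤ multiplicand
instance (multiplier : Int) (multiplicand : Int) : Decidable (Pre_multiply_multiplier_with_multiplicand multiplier multiplicand) := by unfold Pre_multiply_multiplier_with_multiplicand; infer_instance

def pvWitness_multiply_multiplier_with_multiplicand : Int × Int := (3, 5)

def Spec_multiply_multiplier_with_multiplicand (multiplier : Int) (multiplicand : Int) (out : List (List (Option Int))) : Prop := out = multiply_multiplier_with_multiplicand_alt multiplier multiplicand
instance (multiplier : Int) (multiplicand : Int) (out : List (List (Option Int))) : Decidable (Spec_multiply_multiplier_with_multiplicand multiplier multiplicand out) := by unfold Spec_multiply_multiplier_with_multiplicand; infer_instance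

-- ===== CLAIM (what is proved, stated in full; the proofs are below) =====
def Claim_equal_multiply_multiplier_with_multiplicand : Prop := ∀ (multiplier : Int) (multiplicand : Int), Dom_multiply_multiplier_with_multiplicand multiplier multiplicand → Pre_multiply_multiplier_with_multiplicand multiplier multiplicand → Spec_multiply_multiplier_with_multiplicand multiplier multiplicand (multiply_multiplier_with_multiplicand multiplier multiplicand)

-- ===== LEMMAS AND PROOFS =====

lemma pvBinAux_ne_nil (n : Nat) (h : n ≠ 0) : pvBinAux n ≠ [] := by
  cases n with
  | zero => exact absurd rfl h
  | succ m => rw [pvBinAux]; simp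

lemma convert_ne_nil (x : Int) : convert_to_binary_array x ≠ [] := by
  unfold convert_to_binary_array
  split
  · simp
  · exact pvBinAux_ne_nil _ (by assumption)

lemma calcFold (a : Nat) : ∀ m : Nat,
    (List.range (m+1)).foldl (fun r i => if i = 0 then a else r + 2) 0 = a + 2 * m := by
  intro m
  induction m with
  | zero => simp [List.range_succ]
  | succ k ih =>
      rw [List.range_succ, List.foldl_append, ih]
      simp; omega

lemma calcLen_eq (mr mc : List Int) (h : mr ≠ []) :
    calculate_length_of_product mr mc 2 = mc.length + 2 * mr.length := by
  obtain ⟨m, hm⟩ : ∃ m, mr.length = m + 1 := by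
    cases mr with
    | nil => exact absurd rfl h
    | cons a t => exact ⟨t.length, rfl⟩
  unfold calculate_length_of_product
  rw [hm, calcFold]
  omega

lemma mulDigit_eq_map (bit : Int) (mc : List Int) :
    multiply_multiplier_digit_with_multiplicand bit mc = mc.map (fun d => some (pvAnd d bit)) := by
  unfold multiply_multiplier_digit_with_multiplicand
  simpa using PySem.List.foldl_append_singleton_eq_map (fun d => some (pvAnd d bit)) mc []

lemma map_range_getD {β : Type} (mr : List Int) (f : Int → β) :
    (List.range mr.length).map (fun i => f (mr.getD i 0)) = mr.map f := by
  apply List.ext_getElem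
  · simp
  · intro i h1 h2
    simp at h1
    simp [List.getD_eq_getElem?_getD, List.getElem?_eq_getElem h1]

lemma rows_eq_map (mr mc : List Int) :
    (List.range mr.length).foldl
      (fun acc i => acc ++ [multiply_multiplier_digit_with_multiplicand (mr.getD i 0) mc]) []
      = mr.map (fun b => multiply_multiplier_digit_with_multiplicand b mc) := by
  rw [PySem.List.foldl_append_singleton_eq_map
        (fun i => multiply_multiplier_digit_with_multiplicand (mr.getD i 0) mc) (List.range mr.length) []]
  simpa using map_range_getD mr (fun b => multiply_multiplier_digit_with_multiplicand b mc)

lemma main_rows (mc : List Int) (M : Nat) :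
    ∀ (bits : List Int) (i : Nat), i + bits.length = M →
    (add_none_to_end_of_array i 2
        (bits.map (fun b => multiply_multiplier_digit_with_multiplicand b mc))).map
      (add_zeros_to_start (mc.length + 2 * M))
    = altRows mc M i bits := by
  intro bits
  induction bits with
  | nil => intro i _; rfl
  | cons b rest ih =>
      intro i hi
      simp only [List.map_cons, add_none_to_end_of_array, altRows, List.map]
      congr 1
      · rw [mulDigit_eq_map]
        unfold add_zeros_to_start
        have hlen : (mc.map (fun d => some (pvAnd d b)) ++ List.replicate (i * 2) (none : Option Int)).length
            = mc.length + i * 2 := by simp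
        rw [hlen]
        have hi' : i < M := by simp at hi; omega
        have : mc.length + 2 * M - (mc.length + i * 2) = 2 * (M - i) := by omega
        rw [this, List.append_assoc]
      · exact ih (i+1) (by simp at hi ⊢; omega)

-- ===== VERDICT (by name: the statement is the Claim_ definition above) =====
theorem multiply_multiplier_with_multiplicand_spec : Claim_equal_multiply_multiplier_with_multiplicand := by
  intro multiplier multiplicand _ _
  unfold Spec_multiply_multiplier_with_multiplicand
  unfold multiply_multiplier_with_multiplicand multiply_multiplier_with_multiplicand_alt
  simp only
  rw [rows_eq_map, calcLen_eq _ _ (convert_ne_nil multiplier)]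
  exact main_rows _ _ _ 0 (by simp)
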